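-- pv_equiv track=rewrite | github.com/SiddarGu/diplomacy-data | extraction.py | msgs_from_to_humans
-- ===== SOURCE A (Python) =====
-- def msgs_from_humans(data, humans):
--     """
--     get all messages sent by humans in the game
--
--     :param data: dictionary in which key is phase and value is list of messages
--     :param humans: list of human powers in the game
--     :return: a dictionary of messages, with phase as key and list of messages as value
--     """
--     msgs = {}
--     # msgs_by_phase = all_msgs(data)
--     # humans = human_players(data)
--
--     for phase in data:
--         curr_phase_msgs = []
--
--         for msg in data[phase]:
--             if msg["sender"] in humans:
--                 curr_phase_msgs.append(msg)
--
--         if len(curr_phase_msgs) > 0: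
--             msgs[phase] = curr_phase_msgs
--
--     return msgs
--
-- def msgs_from_to_humans(data, humans):
--     """
--     get all messages sent by humans to humans in the game
--
--     :param data: dictionary in which key is phase and value is list of messages
--     :param humans: list of human powers in the game
--     :return: a dictionary of messages, with phase as key and list of messages as value
--     """
--
--     msgs = {}
--     msgs_from_humans_by_phase = msgs_from_humans(data, humans)
--     # humans = human_players(data)
--
--     for phase in msgs_from_humans_by_phase:
--         curr_phase_msgs = []
--
--         for msg in msgs_from_humans_by_phase[phase]:
--             if msg["recipient"] in humans:
--                 curr_phase_msgs.append(msg)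
--
--         if len(curr_phase_msgs) > 0:
--             msgs[phase] = curr_phase_msgs
--
--     return msgs
-- ===== SOURCE B (Python) =====
-- def msgs_from_to_humans(data, humans):
--     """
--     get all messages sent by humans to humans in the game (single fused pass)
--
--     :param data: dictionary in which key is phase and value is list of messages
--     :param humans: list of human powers in the game
--     :return: a dictionary of messages, with phase as key and list of messages as value
--     """
--     return {
--         phase: kept
--         for phase, phase_msgs in data.items()
--         if (kept := [m for m in phase_msgs
--                      if m["sender"] in humans and m["recipient"] in humans])
--     }
-- ===== Notes on version B (the rewrite author's own statement) =====
-- stated objective: simpler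
-- what changed: B drops the msgs_from_humans helper and the intermediate sender-filtered dictionary, doing one fused pass over data.items() that keeps a message when both its sender and its recipient are human, with a dict comprehension instead of two sequential loop-and-insert passes.
import Mathlib
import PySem

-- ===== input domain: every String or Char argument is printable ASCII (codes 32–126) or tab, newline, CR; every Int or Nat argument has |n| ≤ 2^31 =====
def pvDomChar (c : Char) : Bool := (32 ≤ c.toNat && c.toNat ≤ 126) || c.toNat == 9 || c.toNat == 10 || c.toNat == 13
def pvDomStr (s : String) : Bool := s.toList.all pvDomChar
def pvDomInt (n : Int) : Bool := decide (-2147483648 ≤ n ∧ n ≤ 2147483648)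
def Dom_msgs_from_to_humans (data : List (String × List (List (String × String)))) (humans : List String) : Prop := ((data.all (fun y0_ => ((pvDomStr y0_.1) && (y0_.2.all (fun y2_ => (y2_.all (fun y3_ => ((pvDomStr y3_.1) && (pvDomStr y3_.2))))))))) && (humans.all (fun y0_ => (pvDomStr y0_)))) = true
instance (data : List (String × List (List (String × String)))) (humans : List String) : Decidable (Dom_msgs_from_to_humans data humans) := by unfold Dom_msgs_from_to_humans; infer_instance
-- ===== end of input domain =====

-- B fuses A's two sequential filtering passes (helper dict of human-sent messages, then a
-- recipient pass over it) into one self-contained pass keeping messages whose sender AND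
-- recipient are both human; objective: simpler. Return values proved equal on Pre_.

-- ===== PORT A =====
-- helper msgs_from_humans of A
def pvMsgsFromHumans (data : List (String × List (List (String × String)))) (humans : List String) : PySem.Dict String (List (List (String × String))) :=
  let d := PySem.Dict.mk data
  (PySem.Dict.keys d).foldl (fun msgs phase =>
    let curr := (PySem.Dict.getD d phase []).foldl
      (fun acc msg =>
        if humans.contains (PySem.Dict.getD (PySem.Dict.mk msg) "sender" "") then acc ++ [msg] else acc) []
    if curr.length > 0 then PySem.Dict.insert msgs phase curr else msgs) PySem.Dict.empty

def msgs_from_to_humans (data : List (String × List (List (String × String)))) (humans : List String) : List (String × List (List (String × String))) :=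
  let m1 := pvMsgsFromHumans data humans
  ((PySem.Dict.keys m1).foldl (fun msgs phase =>
    let curr := (PySem.Dict.getD m1 phase []).foldl
      (fun acc msg =>
        if humans.contains (PySem.Dict.getD (PySem.Dict.mk msg) "recipient" "") then acc ++ [msg] else acc) []
    if curr.length > 0 then PySem.Dict.insert msgs phase curr else msgs) PySem.Dict.empty).items

-- ===== PORT B =====
-- the fused keep-condition of B: sender human and recipient human
def pvKeep (humans : List String) (m : List (String × String)) : Bool :=
  humans.contains (PySem.Dict.getD (PySem.Dict.mk m) "sender" "")
    && humans.contains (PySem.Dict.getD (PySem.Dict.mk m) "recipient" "")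

def msgs_from_to_humans_alt (data : List (String × List (List (String × String)))) (humans : List String) : List (String × List (List (String × String))) :=
  (PySem.Dict.mk data).items.foldl (fun out pm =>
    let kept := pm.2.filter (pvKeep humans)
    if kept.isEmpty then out else out ++ [(pm.1, kept)]) []

-- ===== PRECONDITION & SPEC =====
-- Pre_ excludes (a) association lists whose phase keys, or whose keys inside one message, are
-- duplicated — a Python dict cannot contain duplicate keys, so such lists encode no Python
-- input and their first-match reading is accidental — and (b) messages that make A raise a
-- KeyError: a message with no "sender" key, or with a human sender and no "recipient" key.
def Pre_msgs_from_to_humans (data : List (String × List (List (String × String)))) (humans : List String) : Prop :=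
  (data.map Prod.fst).Nodup ∧
  ∀ pm ∈ data, ∀ m ∈ pm.2,
    (m.map Prod.fst).Nodup ∧
    "sender" ∈ m.map Prod.fst ∧
    (PySem.Dict.getD (PySem.Dict.mk m) "sender" "" ∈ humans → "recipient" ∈ m.map Prod.fst)
instance (data : List (String × List (List (String × String)))) (humans : List String) : Decidable (Pre_msgs_from_to_humans data humans) := by unfold Pre_msgs_from_to_humans; infer_instance

def pvWitness_msgs_from_to_humans : (List (String × List (List (String × String)))) × List String :=
  ([("S1901M", [[("sender", "AUS"), ("recipient", "ENG")], [("sender", "BOT"), ("recipient", "AUS")]]),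
    ("F1901M", [[("sender", "ENG"), ("recipient", "AUS")]])],
   ["AUS", "ENG"])

def Spec_msgs_from_to_humans (data : List (String × List (List (String × String)))) (humans : List String) (out : List (String × List (List (String × String)))) : Prop := out = msgs_from_to_humans_alt data humans
instance (data : List (String × List (List (String × String)))) (humans : List String) (out : List (String × List (List (String × String)))) : Decidable (Spec_msgs_from_to_humans data humans out) := by unfold Spec_msgs_from_to_humans; infer_instance

-- ===== CLAIM (what is proved, stated in full; the proofs are below) =====
def Claim_equal_msgs_from_to_humans : Prop := ∀ (data : List (String × List (List (String × String)))) (humans : List String), Dom_msgs_from_to_humans data humans → Pre_msgs_from_to_humans data humans → Spec_msgs_from_to_humans data humans (msgs_from_to_humans data humans)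

-- ===== LEMMAS AND PROOFS =====

-- the sender / recipient tests of the two programs, named for the proofs
def pvS (humans : List String) (m : List (String × String)) : Bool :=
  humans.contains (PySem.Dict.getD (PySem.Dict.mk m) "sender" "")
def pvR (humans : List String) (m : List (String × String)) : Bool :=
  humans.contains (PySem.Dict.getD (PySem.Dict.mk m) "recipient" "")

-- the per-phase result of one filtering pass, as a filterMap step
def pvStep (p : List (String × String) → Bool) (pm : String × List (List (String × String))) : Option (String × List (List (String × String))) :=
  let f := pm.2.filter p
  if f.isEmpty then none else some (pm.1, f)

theorem pvStep_none (p : List (String × String) → Bool) (pm : String × List (List (String × String)))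
    (h : (pm.2.filter p).isEmpty = true) : pvStep p pm = none := by
  unfold pvStep; rw [if_pos h]

theorem pvStep_some (p : List (String × String) → Bool) (pm : String × List (List (String × String)))
    (h : ¬ (pm.2.filter p).isEmpty = true) : pvStep p pm = some (pm.1, pm.2.filter p) := by
  unfold pvStep; rw [if_neg h]

-- A's outer loop over the keys of a dict d, with an accumulator fresh for those keys
theorem pvPhaseLoop (d : PySem.Dict String (List (List (String × String)))) (p : List (String × String) → Bool)
    (ks : List String) (acc : PySem.Dict String (List (List (String × String))))
    (hnd : ks.Nodup) (hfresh : ∀ k ∈ ks, acc.contains k = false) :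
    ks.foldl (fun msgs phase =>
      let curr := (PySem.Dict.getD d phase []).foldl
        (fun a m => if p m then a ++ [m] else a) []
      if curr.length > 0 then PySem.Dict.insert msgs phase curr else msgs) acc
    = PySem.Dict.mk (acc.items ++ ks.filterMap (fun k => pvStep p (k, PySem.Dict.getD d k []))) := by
  induction ks generalizing acc with
  | nil => simp
  | cons k ks ih =>
    have hcurr : (PySem.Dict.getD d k []).foldl (fun a m => if p m then a ++ [m] else a) []
        = (PySem.Dict.getD d k []).filter p := by
      simpa using PySem.List.foldl_append_if p id (PySem.Dict.getD d k []) []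
    have hknotin : k ∉ ks := (List.nodup_cons.mp hnd).1
    have hndt : ks.Nodup := (List.nodup_cons.mp hnd).2
    rw [List.foldl_cons, List.filterMap_cons]
    by_cases hemp : ((PySem.Dict.getD d k []).filter p).isEmpty = true
    · have hstep : (let curr := (PySem.Dict.getD d k []).foldl (fun a m => if p m then a ++ [m] else a) []
          if curr.length > 0 then PySem.Dict.insert acc k curr else acc) = acc := by
        show (if ((PySem.Dict.getD d k []).foldl (fun a m => if p m then a ++ [m] else a) []).length > 0
            then PySem.Dict.insert acc k ((PySem.Dict.getD d k []).foldl (fun a m => if p m then a ++ [m] else a) [])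
            else acc) = acc
        rw [hcurr, List.isEmpty_iff.mp hemp]
        simp
      rw [hstep, ih acc hndt (fun k' hk' => hfresh k' (List.mem_cons_of_mem _ hk')),
        pvStep_none p _ (by simpa using hemp)]
    · have hlen : ((PySem.Dict.getD d k []).filter p).length > 0 := by
        cases h : (PySem.Dict.getD d k []).filter p with
        | nil => rw [h] at hemp; simp at hemp
        | cons a l => simp
      have hc : acc.contains k = false := hfresh k List.mem_cons_self
      have hstep : (let curr := (PySem.Dict.getD d k []).foldl (fun a m => if p m then a ++ [m] else a) []
          if curr.length > 0 then PySem.Dict.insert acc k curr else acc)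
          = PySem.Dict.mk (acc.items ++ [(k, (PySem.Dict.getD d k []).filter p)]) := by
        show (if ((PySem.Dict.getD d k []).foldl (fun a m => if p m then a ++ [m] else a) []).length > 0
            then PySem.Dict.insert acc k ((PySem.Dict.getD d k []).foldl (fun a m => if p m then a ++ [m] else a) [])
            else acc) = PySem.Dict.mk (acc.items ++ [(k, (PySem.Dict.getD d k []).filter p)])
        rw [hcurr, if_pos hlen]
        unfold PySem.Dict.insert
        rw [hc]
        simp
      rw [hstep, ih _ hndt ?_, pvStep_some p _ (by simpa using hemp)]
      · simp
      · intro k' hk'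
        have h1 : acc.contains k' = false := hfresh k' (List.mem_cons_of_mem _ hk')
        unfold PySem.Dict.contains at h1 ⊢
        rw [List.any_append]
        simp only [h1, Bool.false_or, List.any_cons, List.any_nil, Bool.or_false]
        simp only [beq_eq_false_iff_ne, ne_eq]
        intro h; exact hknotin (h ▸ hk')

-- iterating over the keys of a nodup association list, looking each key up,
-- visits exactly the pairs of the list
theorem pvKeysLookup {V R : Type} (dflt : V) (d : List (String × V)) (hnd : (d.map Prod.fst).Nodup)
    (F : String → V → Option R) :
    (d.map Prod.fst).filterMap (fun k => F k (PySem.Dict.getD (PySem.Dict.mk d) k dflt))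
      = d.filterMap (fun pm => F pm.1 pm.2) := by
  induction d with
  | nil => simp
  | cons pm t ih =>
    have hhead : PySem.Dict.getD (PySem.Dict.mk (pm :: t)) pm.1 dflt = pm.2 := by
      simp [PySem.Dict.getD, PySem.Dict.get?, List.find?]
    have hpm : pm.1 ∉ t.map Prod.fst := (List.nodup_cons.mp hnd).1
    have hndt : (t.map Prod.fst).Nodup := (List.nodup_cons.mp hnd).2
    have htail : ∀ k ∈ t.map Prod.fst,
        F k (PySem.Dict.getD (PySem.Dict.mk (pm :: t)) k dflt)
          = F k (PySem.Dict.getD (PySem.Dict.mk t) k dflt) := by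
      intro k hk
      have hne : (pm.1 == k) = false := by
        simp only [beq_eq_false_iff_ne, ne_eq]
        intro h; exact hpm (h ▸ hk)
      simp [PySem.Dict.getD, PySem.Dict.get?, List.find?, hne]
    rw [List.map_cons, List.filterMap_cons, List.filterMap_cons, hhead,
      List.filterMap_congr htail, ih hndt]

-- B's loop is a filterMap
theorem pvLoopB (humans : List String) (l : List (String × List (List (String × String))))
    (acc : List (String × List (List (String × String)))) :
    l.foldl (fun out pm =>
        let kept := pm.2.filter (pvKeep humans)
        if kept.isEmpty then out else out ++ [(pm.1, kept)]) acc
      = acc ++ l.filterMap (pvStep (pvKeep humans)) := by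
  induction l generalizing acc with
  | nil => simp
  | cons pm t ih =>
    rw [List.foldl_cons, List.filterMap_cons]
    by_cases h : (pm.2.filter (pvKeep humans)).isEmpty = true
    · have hstep : (let kept := pm.2.filter (pvKeep humans)
          if kept.isEmpty then acc else acc ++ [(pm.1, kept)]) = acc := by
        show (if (pm.2.filter (pvKeep humans)).isEmpty
            then acc else acc ++ [(pm.1, pm.2.filter (pvKeep humans))]) = acc
        rw [if_pos h]
      rw [hstep, ih acc, pvStep_none _ _ h]
    · have hstep : (let kept := pm.2.filter (pvKeep humans)
          if kept.isEmpty then acc else acc ++ [(pm.1, kept)])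
          = acc ++ [(pm.1, pm.2.filter (pvKeep humans))] := by
        show (if (pm.2.filter (pvKeep humans)).isEmpty
            then acc else acc ++ [(pm.1, pm.2.filter (pvKeep humans))])
            = acc ++ [(pm.1, pm.2.filter (pvKeep humans))]
        rw [if_neg h]
      rw [hstep, ih, pvStep_some _ _ h]
      simp
-- keys produced by one pass are a sublist of the keys of its input
theorem pvKeysStep (p : List (String × String) → Bool) (d : List (String × List (List (String × String)))) :
    ((d.filterMap (pvStep p)).map Prod.fst).Sublist (d.map Prod.fst) := by
  induction d with
  | nil => simp
  | cons pm t ih =>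
    rw [List.filterMap_cons, List.map_cons]
    by_cases h : (pm.2.filter p).isEmpty = true
    · rw [pvStep_none p pm h]
      exact List.Sublist.cons _ ih
    · rw [pvStep_some p pm h]
      simpa using ih.cons₂ pm.1

-- the two successive passes of A compose to B's single fused pass
theorem pvStepCompose (humans : List String) (pm : String × List (List (String × String))) :
    (pvStep (pvS humans) pm).bind (pvStep (pvR humans)) = pvStep (pvKeep humans) pm := by
  have hff : pm.2.filter (pvKeep humans) = (pm.2.filter (pvS humans)).filter (pvR humans) := by
    rw [List.filter_filter]
    apply List.filter_congr
    intro m _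
    simp [pvKeep, pvS, pvR, Bool.and_comm]
  by_cases hs : (pm.2.filter (pvS humans)).isEmpty = true
  · have hk : (pm.2.filter (pvKeep humans)).isEmpty = true := by
      rw [hff, List.isEmpty_iff.mp hs]
      simp
    rw [pvStep_none _ _ hs, pvStep_none _ _ hk]
    rfl
  · rw [pvStep_some _ _ hs, Option.bind_some]
    by_cases hr : ((pm.2.filter (pvS humans)).filter (pvR humans)).isEmpty = true
    · rw [pvStep_none _ _ (by simpa using hr), pvStep_none _ _ (by rw [hff]; exact hr)]
    · rw [pvStep_some _ _ (by simpa using hr), pvStep_some _ _ (by rw [hff]; exact hr)]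
      simp [hff]

-- ===== VERDICT (by name: the statement is the Claim_ definition above) =====
theorem msgs_from_to_humans_spec : Claim_equal_msgs_from_to_humans := by
  intro data humans _hdom hpre
  obtain ⟨hnd, -⟩ := hpre
  unfold Spec_msgs_from_to_humans
  -- stage 1 of A
  have h1 : pvMsgsFromHumans data humans = PySem.Dict.mk (data.filterMap (pvStep (pvS humans))) := by
    refine (pvPhaseLoop (PySem.Dict.mk data) (pvS humans) (data.map Prod.fst) PySem.Dict.empty hnd
        (fun k _ => rfl)).trans ?_
    have := pvKeysLookup ([] : List (List (String × String))) data hnd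
      (fun k v => pvStep (pvS humans) (k, v))
    simpa using congrArg PySem.Dict.mk this
  -- keys of stage 1's result are nodup
  have hnd1 : ((data.filterMap (pvStep (pvS humans))).map Prod.fst).Nodup :=
    hnd.sublist (pvKeysStep (pvS humans) data)
  -- stage 2 of A
  have h2 : msgs_from_to_humans data humans
      = (data.filterMap (pvStep (pvS humans))).filterMap (pvStep (pvR humans)) := by
    show ((PySem.Dict.keys (pvMsgsFromHumans data humans)).foldl _ PySem.Dict.empty).items = _
    rw [h1]
    refine congrArg PySem.Dict.items ((pvPhaseLoop (PySem.Dict.mk (data.filterMap (pvStep (pvS humans))))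
        (pvR humans) ((data.filterMap (pvStep (pvS humans))).map Prod.fst) PySem.Dict.empty hnd1
        (fun k _ => rfl)).trans ?_)
    have := pvKeysLookup ([] : List (List (String × String))) (data.filterMap (pvStep (pvS humans))) hnd1
      (fun k v => pvStep (pvR humans) (k, v))
    simpa using congrArg PySem.Dict.mk this
  -- B is the fused single pass
  have hB : msgs_from_to_humans_alt data humans = data.filterMap (pvStep (pvKeep humans)) :=
    (pvLoopB humans data []).trans (List.nil_append _)
  rw [h2, hB, List.filterMap_filterMap]
  exact List.filterMap_congr (fun pm _ => pvStepCompose humans pm)
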